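-- pv_equiv track=rewrite | github.com/dstine/aoc | aoc_2018/py18/day02.py | count
-- ===== SOURCE A (Python) =====
-- def count(id):
--     has_double = False
--     has_triple = False
--     for c in id:
--         if not has_double and id.count(c) == 2:
--             has_double = True
--         elif not has_triple and id.count(c) == 3:
--             has_triple = True
--     return (has_double, has_triple)
-- ===== SOURCE B (Python) =====
-- def count(id):
--     has_double = False
--     has_triple = False
--     prev = None
--     run = 0
--     for c in sorted(id):
--         if prev == c:
--             run += 1
--         else:
--             if run == 2:
--                 has_double = True
--             if run == 3:
--                 has_triple = True
--             prev = c
--             run = 1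
--     if run == 2:
--         has_double = True
--     if run == 3:
--         has_triple = True
--     return (has_double, has_triple)
-- ===== Notes on version B (the rewrite author's own statement) =====
-- stated objective: faster
-- what changed: Replaces the per-character full-string str.count rescans with sorting the characters once and a single pass over runs of equal characters.
import Mathlib
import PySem

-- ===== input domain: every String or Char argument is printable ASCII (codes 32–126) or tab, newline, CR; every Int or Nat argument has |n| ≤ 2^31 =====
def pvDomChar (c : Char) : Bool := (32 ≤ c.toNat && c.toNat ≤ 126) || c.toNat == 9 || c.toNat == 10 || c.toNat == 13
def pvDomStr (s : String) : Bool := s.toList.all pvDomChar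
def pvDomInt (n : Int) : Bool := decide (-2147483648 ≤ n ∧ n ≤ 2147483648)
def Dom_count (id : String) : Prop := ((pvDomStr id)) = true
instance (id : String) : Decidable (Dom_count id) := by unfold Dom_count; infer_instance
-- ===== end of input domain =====

-- B sorts the characters once and scans runs of equal characters instead of
-- rescanning the whole string with str.count for every character (faster).


-- ===== PORT A =====
-- for c in id: if not has_double and id.count(c) == 2 … elif not has_triple and id.count(c) == 3 …
def countStepA (id : String) (st : Bool × Bool) (c : Char) : Bool × Bool :=
  if !st.1 && (PySem.Str.count id (String.singleton c) == 2) then (true, st.2)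
  else if !st.2 && (PySem.Str.count id (String.singleton c) == 3) then (st.1, true)
  else st

def count (id : String) : List Bool :=
  let st := id.toList.foldl (countStepA id) (false, false)
  [st.1, st.2]

-- ===== PORT B =====
-- run-length scan over sorted(id): prev == c extends the run, else close the run and start a new one
def countStepB (st : Bool × Bool × Option Char × Nat) (c : Char) : Bool × Bool × Option Char × Nat :=
  if st.2.2.1 = some c then (st.1, st.2.1, st.2.2.1, st.2.2.2 + 1)
  else (st.1 || (st.2.2.2 == 2), st.2.1 || (st.2.2.2 == 3), some c, 1)

def count_alt (id : String) : List Bool :=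
  let s := PySem.List.sorted id.toList (fun x => x) false
  let st := s.foldl countStepB (false, false, none, 0)
  [st.1 || (st.2.2.2 == 2), st.2.1 || (st.2.2.2 == 3)]

-- ===== PRECONDITION & SPEC =====
def Spec_count (id : String) (out : List Bool) : Prop := out = count_alt id
instance (id : String) (out : List Bool) : Decidable (Spec_count id out) := by unfold Spec_count; infer_instance

-- ===== CLAIM (what is proved, stated in full; the proofs are below) =====
def Claim_equal_count : Prop := ∀ (id : String), Dom_count id → Spec_count id (count id)

-- ===== LEMMAS AND PROOFS =====

-- fuel-indexed unfolding of PySem's substring counter for a one-character pattern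
theorem pv_count_go_single (c : Char) : ∀ (fuel : Nat) (l : List Char) (acc : Nat),
    l.length ≤ fuel → PySem.Chars.count.go [c] fuel l acc = acc + l.count c := by
  intro fuel
  induction fuel with
  | zero => intro l acc h; cases l with
    | nil => simp [PySem.Chars.count.go]
    | cons a t => simp at h
  | succ f ih => intro l acc h; cases l with
    | nil => simp [PySem.Chars.count.go]
    | cons a t =>
      simp only [PySem.Chars.count.go]
      by_cases hc : c = a
      · subst hc
        have hpre : List.isPrefixOf [c] (c :: t) = true := by simp [List.isPrefixOf]
        simp only [hpre]
        rw [ih _ _ (by simpa using Nat.le_of_succ_le_succ (by simpa using h))]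
        simp
        omega
      · have hpre : List.isPrefixOf [c] (a :: t) = false := by
          simp [List.isPrefixOf]; exact fun h' => (hc h')
        simp only [hpre, Bool.false_eq_true, if_false]
        rw [ih _ _ (by simpa using h)]
        simp [Ne.symm hc]

-- str.count of a single character is the character count
theorem pv_count_single (s : String) (c : Char) :
    PySem.Str.count s (String.singleton c) = s.toList.count c := by
  simp only [PySem.Str.count_eq]
  have h : (String.singleton c).toList = [c] := by simp
  rw [h]
  simp [PySem.Chars.count]
  rw [pv_count_go_single c s.length s.toList 0 (by simp)]
  omega

-- one step of A's loop is the plain or-step of the two count tests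
theorem pv_stepA (id : String) (d t : Bool) (c : Char) :
    countStepA id (d, t) c
      = (d || (id.toList.count c == 2), t || (id.toList.count c == 3)) := by
  simp only [countStepA, pv_count_single]
  by_cases h2 : id.toList.count c = 2 <;> by_cases h3 : id.toList.count c = 3 <;>
    cases d <;> cases t <;> simp_all

-- A's fold computes 'some character has count 2 / count 3'
theorem pv_foldA (id : String) (l : List Char) (d t : Bool) :
    l.foldl (countStepA id) (d, t)
      = (d || l.any (fun c => id.toList.count c == 2),
         t || l.any (fun c => id.toList.count c == 3)) := by
  induction l generalizing d t with
  | nil => simp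
  | cons c l ih =>
    simp only [List.foldl_cons, pv_stepA, ih, List.any_cons]
    simp [Bool.or_assoc]

-- closing the run of p: reading one more p off the front of the list
theorem pv_shift1 (l : List Char) (p : Char) (m n : Nat) :
    ((n + 1) + l.count p = m ∨ ∃ x ∈ l, x ≠ p ∧ l.count x = m) ↔
      (n + (p :: l).count p = m ∨ ∃ x ∈ p :: l, x ≠ p ∧ (p :: l).count x = m) := by
  constructor
  · rintro (h | ⟨x, hx, hxp, hcnt⟩)
    · left; simp; omega
    · right; exact ⟨x, List.mem_cons_of_mem _ hx, hxp,
        by simpa [List.count_cons, Ne.symm hxp] using hcnt⟩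
  · rintro (h | ⟨x, hx, hxp, hcnt⟩)
    · left; simp at h; omega
    · rcases List.mem_cons.1 hx with rfl | hx'
      · exact absurd rfl hxp
      · right; exact ⟨x, hx', hxp, by simpa [List.count_cons, Ne.symm hxp] using hcnt⟩

-- starting a fresh run at c after a run of p < c that had length n
theorem pv_shift2 (l : List Char) (c p : Char) (m n : Nat)
    (hpc : p < c) (hcl : ∀ x ∈ l, c ≤ x) :
    (n = m ∨ (1 + l.count c = m ∨ ∃ x ∈ l, x ≠ c ∧ l.count x = m)) ↔
      (n + (c :: l).count p = m ∨ ∃ x ∈ c :: l, x ≠ p ∧ (c :: l).count x = m) := by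
  have hnotin : p ∉ c :: l := by
    intro hmem
    rcases List.mem_cons.1 hmem with rfl | h'
    · exact absurd hpc (lt_irrefl _)
    · exact absurd (hcl p h') (not_le.2 hpc)
  have hcl0 : (c :: l).count p = 0 := List.count_eq_zero.2 hnotin
  constructor
  · rintro (h | h | ⟨x, hx, hxc, hcnt⟩)
    · left; omega
    · right; exact ⟨c, List.mem_cons_self, fun h' => absurd h'.symm (ne_of_lt hpc),
        by simp; omega⟩
    · have hxp : x ≠ p := by
        intro h'; subst h'; exact hnotin (List.mem_cons_of_mem _ hx)
      right; exact ⟨x, List.mem_cons_of_mem _ hx, hxp,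
        by simpa [List.count_cons, Ne.symm hxc] using hcnt⟩
  · rintro (h | ⟨x, hx, hxp, hcnt⟩)
    · left; omega
    · rcases List.mem_cons.1 hx with rfl | hx'
      · right; left; simp at hcnt; omega
      · by_cases hxc : x = c
        · subst hxc; right; left; simp at hcnt; omega
        · right; right; exact ⟨x, hx', hxc, by simpa [List.count_cons, Ne.symm hxc] using hcnt⟩

-- B's invariant: on a sorted tail dominated by the running character p (run length n so far),
-- each output bit says 'some character of the whole scanned block has total count 2 (resp. 3)'
theorem pv_foldB (l : List Char) (p : Char) (n : Nat) (d t : Bool)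
    (hle : ∀ x ∈ l, p ≤ x) (hs : l.Pairwise (· ≤ ·)) :
    (((l.foldl countStepB (d, t, some p, n)).1 || ((l.foldl countStepB (d, t, some p, n)).2.2.2 == 2)) = true ↔
      (d = true ∨ n + l.count p = 2 ∨ ∃ x ∈ l, x ≠ p ∧ l.count x = 2)) ∧
    (((l.foldl countStepB (d, t, some p, n)).2.1 || ((l.foldl countStepB (d, t, some p, n)).2.2.2 == 3)) = true ↔
      (t = true ∨ n + l.count p = 3 ∨ ∃ x ∈ l, x ≠ p ∧ l.count x = 3)) := by
  induction l generalizing p n d t with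
  | nil => simp
  | cons c l ih =>
    rw [List.pairwise_cons] at hs
    by_cases hc : p = c
    · subst hc
      have e1 : countStepB (d, t, some p, n) p = (d, t, some p, n + 1) := by
        simp [countStepB]
      rw [List.foldl_cons, e1]
      obtain ⟨ih2, ih3⟩ := ih p (n + 1) d t (fun x hx => hs.1 x hx) hs.2
      constructor
      · rw [ih2]
        constructor
        · rintro (h | h); · exact Or.inl h
          · exact Or.inr ((pv_shift1 l p 2 n).1 h)
        · rintro (h | h); · exact Or.inl h
          · exact Or.inr ((pv_shift1 l p 2 n).2 h)
      · rw [ih3]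
        constructor
        · rintro (h | h); · exact Or.inl h
          · exact Or.inr ((pv_shift1 l p 3 n).1 h)
        · rintro (h | h); · exact Or.inl h
          · exact Or.inr ((pv_shift1 l p 3 n).2 h)
    · have hpc : p < c := lt_of_le_of_ne (hle c List.mem_cons_self) hc
      have e2 : countStepB (d, t, some p, n) c
          = (d || (n == 2), t || (n == 3), some c, 1) := by
        simp [countStepB, hc]
      rw [List.foldl_cons, e2]
      obtain ⟨ih2, ih3⟩ := ih c 1 (d || (n == 2)) (t || (n == 3)) (fun x hx => hs.1 x hx) hs.2
      constructor
      · rw [ih2]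
        constructor
        · rintro (h | h)
          · rcases Bool.or_eq_true_iff.1 h with h' | h'
            · exact Or.inl h'
            · exact Or.inr ((pv_shift2 l c p 2 n hpc hs.1).1 (Or.inl (by simpa using h')))
          · exact Or.inr ((pv_shift2 l c p 2 n hpc hs.1).1 (Or.inr h))
        · rintro (h | h)
          · exact Or.inl (by simp [h])
          · rcases (pv_shift2 l c p 2 n hpc hs.1).2 h with h' | h'
            · exact Or.inl (by simp [h'])
            · exact Or.inr h'
      · rw [ih3]
        constructor
        · rintro (h | h)
          · rcases Bool.or_eq_true_iff.1 h with h' | h'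
            · exact Or.inl h'
            · exact Or.inr ((pv_shift2 l c p 3 n hpc hs.1).1 (Or.inl (by simpa using h')))
          · exact Or.inr ((pv_shift2 l c p 3 n hpc hs.1).1 (Or.inr h))
        · rintro (h | h)
          · exact Or.inl (by simp [h])
          · rcases (pv_shift2 l c p 3 n hpc hs.1).2 h with h' | h'
            · exact Or.inl (by simp [h'])
            · exact Or.inr h'

-- 'some character of the sorted list s = c :: rest has count m' read off B's initial step
theorem pv_exists_head (rest : List Char) (c : Char) (m : Nat) :
    (1 + rest.count c = m ∨ ∃ x ∈ rest, x ≠ c ∧ rest.count x = m) ↔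
      (∃ x ∈ c :: rest, (c :: rest).count x = m) := by
  constructor
  · rintro (h | ⟨x, hx, hxc, hcnt⟩)
    · exact ⟨c, List.mem_cons_self, by simp; omega⟩
    · exact ⟨x, List.mem_cons_of_mem _ hx, by simpa [List.count_cons, Ne.symm hxc] using hcnt⟩
  · rintro ⟨x, hx, hcnt⟩
    rcases List.mem_cons.1 hx with rfl | hx'
    · left; simp at hcnt; omega
    · by_cases hxc : x = c
      · subst hxc; left; simp at hcnt; omega
      · right; exact ⟨x, hx', hxc, by simpa [List.count_cons, Ne.symm hxc] using hcnt⟩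

-- ===== VERDICT (by name: the statement is the Claim_ definition above) =====
theorem count_spec : Claim_equal_count := by
  intro id _
  unfold Spec_count count count_alt
  rw [pv_foldA id id.toList false false]
  have hperm : (PySem.List.sorted id.toList (fun x => x) false).Perm id.toList :=
    PySem.List.sorted_perm _ _ _
  have hpw : (PySem.List.sorted id.toList (fun x => x) false).Pairwise (· ≤ ·) :=
    PySem.List.sorted_pairwise _ _
  cases hsort : PySem.List.sorted id.toList (fun x => x) false with
  | nil =>
    have : id.toList = [] := by
      have := hsort ▸ hperm
      simpa using this.symm.eq_nil
    simp [this]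
  | cons c rest =>
    rw [hsort] at hperm hpw
    rw [List.pairwise_cons] at hpw
    have e0 : countStepB (false, false, none, 0) c = (false, false, some c, 1) := by
      simp [countStepB]
    simp only [List.foldl_cons, e0, Bool.false_or]
    obtain ⟨i2, i3⟩ := pv_foldB rest c 1 false false hpw.1 hpw.2
    have b2 : ((rest.foldl countStepB (false, false, some c, 1)).1 ||
        ((rest.foldl countStepB (false, false, some c, 1)).2.2.2 == 2))
        = id.toList.any (fun x => id.toList.count x == 2) := by
      rw [Bool.eq_iff_iff, i2]
      simp only [Bool.false_eq_true, false_or, List.any_eq_true, beq_iff_eq]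
      rw [pv_exists_head rest c 2]
      constructor
      · rintro ⟨x, hx, hcnt⟩
        exact ⟨x, hperm.subset hx, by rw [← hperm.count_eq]; exact hcnt⟩
      · rintro ⟨x, hx, hcnt⟩
        exact ⟨x, hperm.symm.subset hx, by rw [hperm.count_eq]; exact hcnt⟩
    have b3 : ((rest.foldl countStepB (false, false, some c, 1)).2.1 ||
        ((rest.foldl countStepB (false, false, some c, 1)).2.2.2 == 3))
        = id.toList.any (fun x => id.toList.count x == 3) := by
      rw [Bool.eq_iff_iff, i3]
      simp only [Bool.false_eq_true, false_or, List.any_eq_true, beq_iff_eq]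
      rw [pv_exists_head rest c 3]
      constructor
      · rintro ⟨x, hx, hcnt⟩
        exact ⟨x, hperm.subset hx, by rw [← hperm.count_eq]; exact hcnt⟩
      · rintro ⟨x, hx, hcnt⟩
        exact ⟨x, hperm.symm.subset hx, by rw [hperm.count_eq]; exact hcnt⟩
    rw [b2, b3]
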